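-- pv_equiv track=rewrite | github.com/lucasdiniz/govbr-cruza-dados | etl/21_views.py | _strip_line_comments
-- ===== SOURCE A (Python) =====
-- def _strip_line_comments(sql: str) -> str:
--     """Remove '--' line comments, preservando literais entre aspas.
--
--     Necessário porque sql/12_views.sql tem comentários com ';' dentro
--     (ex.: ``-- DROP TABLE foo;  -- nota``). Sem essa limpeza, um
--     ``split(';')`` ingênuo quebra no meio dos comentários e cola chunks
--     reais de CREATE a blocos de comentário, fazendo com que statements
--     sejam silenciosamente descartados pelo filtro ``startswith('--')``.
--     """
--     out: list[str] = []
--     in_single = False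
--     in_double = False
--     i = 0
--     n = len(sql)
--     while i < n:
--         ch = sql[i]
--         if ch == "'" and not in_double:
--             # Aspas duplicadas ('') = apóstrofo literal dentro de string
--             if in_single and i + 1 < n and sql[i + 1] == "'":
--                 out.append("''")
--                 i += 2
--                 continue
--             in_single = not in_single
--             out.append(ch)
--             i += 1
--             continue
--         if ch == '"' and not in_single:
--             in_double = not in_double
--             out.append(ch)
--             i += 1
--             continue
--         if ch == "-" and i + 1 < n and sql[i + 1] == "-" and not in_single and not in_double:
--             # Pula até o fim da linha (preserva o \n para manter numeração)
--             while i < n and sql[i] != "\n":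
--                 i += 1
--             continue
--         out.append(ch)
--         i += 1
--     return "".join(out)
-- ===== SOURCE B (Python) =====
-- def _strip_line_comments(sql: str) -> str:
--     """Remove '--' line comments, preservando literais entre aspas.
--
--     Chunk-jumping tokenizer: repeatedly find the next quote or '--' with
--     str.find, copy whole stretches of plain code at once, consume quoted
--     literals wholly, and drop comment bodies up to (not including) '\n'.
--     """
--     out = []
--     i = 0
--     n = len(sql)
--     while i < n:
--         ks = sql.find("'", i)
--         kd = sql.find('"', i)
--         kc = sql.find("--", i)
--         cands = [k for k in (ks, kd, kc) if k != -1]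
--         if not cands:
--             out.append(sql[i:])
--             break
--         k = min(cands)
--         out.append(sql[i:k])
--         if k == ks:
--             out.append("'")
--             j = k + 1
--             i = n
--             while True:
--                 e = sql.find("'", j)
--                 if e == -1:
--                     out.append(sql[j:])
--                     break
--                 if sql[e + 1:e + 2] == "'":
--                     out.append(sql[j:e + 2])
--                     j = e + 2
--                     continue
--                 out.append(sql[j:e + 1])
--                 i = e + 1
--                 break
--         elif k == kd:
--             out.append('"')
--             e = sql.find('"', k + 1)
--             if e == -1:
--                 out.append(sql[k + 1:])
--                 break
--             out.append(sql[k + 1:e + 1])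
--             i = e + 1
--         else:
--             e = sql.find("\n", k + 2)
--             if e == -1:
--                 break
--             i = e
--     return "".join(out)
-- ===== Notes on version B (the rewrite author's own statement) =====
-- stated objective: faster
-- what changed: Replaced A's per-character state machine (two boolean in-string flags, one Python-level branch per character) by a chunk-jumping tokenizer that uses str.find to locate the next quote or comment marker, copies plain code and whole quoted literals as slices, and drops comment bodies with one newline search.
import Mathlib
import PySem

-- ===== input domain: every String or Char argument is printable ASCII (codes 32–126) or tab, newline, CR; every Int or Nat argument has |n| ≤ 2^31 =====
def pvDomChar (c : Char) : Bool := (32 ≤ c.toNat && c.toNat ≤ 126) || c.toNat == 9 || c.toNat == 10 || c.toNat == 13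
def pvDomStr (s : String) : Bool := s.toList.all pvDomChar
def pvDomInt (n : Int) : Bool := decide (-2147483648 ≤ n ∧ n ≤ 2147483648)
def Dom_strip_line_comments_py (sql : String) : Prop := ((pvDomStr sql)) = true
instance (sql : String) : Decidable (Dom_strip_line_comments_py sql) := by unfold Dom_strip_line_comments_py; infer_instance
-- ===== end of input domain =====

-- B replaces A's char-by-char state machine with a chunk-jumping tokenizer (str.find + whole-slice copies); objective: faster (measured).
-- Loops are written with a fuel argument as a totality guard; every call passes fuel ≥ the remaining index range, so fuel never runs out.

-- ===== PORT A =====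
-- inner 'while i < n and sql[i] != chr(10)' comment skip of A
def pvSkipA (s : List Char) (n : Nat) : Nat → Nat → Nat
  | 0, i => i
  | fuel + 1, i => if i < n ∧ s.getD i ' ' ≠ '\n' then pvSkipA s n fuel (i + 1) else i

-- A's main while loop: index i, flags in_single/in_double, accumulator out (ch = sql[i] inlined)
def pvLoopA (s : List Char) (n : Nat) : Nat → Nat → Bool → Bool → List Char → List Char
  | 0, _, _, _, out => out
  | fuel + 1, i, ins, ind, out =>
    if i < n then
      if s.getD i ' ' = '\'' ∧ ind = false then
        if ins = true ∧ i + 1 < n ∧ s.getD (i + 1) ' ' = '\'' then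
          pvLoopA s n fuel (i + 2) ins ind (out ++ ['\'', '\''])
        else
          pvLoopA s n fuel (i + 1) (!ins) ind (out ++ [s.getD i ' '])
      else if s.getD i ' ' = '"' ∧ ins = false then
        pvLoopA s n fuel (i + 1) ins (!ind) (out ++ [s.getD i ' '])
      else if s.getD i ' ' = '-' ∧ i + 1 < n ∧ s.getD (i + 1) ' ' = '-' ∧ ins = false ∧ ind = false then
        pvLoopA s n fuel (pvSkipA s n (n - i) i) ins ind out
      else
        pvLoopA s n fuel (i + 1) ins ind (out ++ [s.getD i ' '])
    else out

def strip_line_comments_py (sql : String) : String :=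
  String.ofList (pvLoopA sql.toList sql.toList.length sql.toList.length 0 false false [])

-- ===== PORT B =====
-- sql[i:k] on the char list
def pvSlice (s : List Char) (i k : Nat) : List Char := (s.drop i).take (k - i)

-- sql.find(c, i) for a single character c (index, or none for -1)
def pvFindCh (s : List Char) (n : Nat) : Nat → Char → Nat → Option Nat
  | 0, _, _ => none
  | fuel + 1, c, i =>
    if i < n then (if s.getD i ' ' = c then some i else pvFindCh s n fuel c (i + 1)) else none

-- sql.find("--", i)
def pvFindDash2 (s : List Char) (n : Nat) : Nat → Nat → Option Nat
  | 0, _ => none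
  | fuel + 1, i =>
    if i + 1 < n then
      (if s.getD i ' ' = '-' ∧ s.getD (i + 1) ' ' = '-' then some i else pvFindDash2 s n fuel (i + 1))
    else none

-- min over the candidates that are present (Python's min over the filtered list)
def pvMin2 : Option Nat → Option Nat → Option Nat
  | none, b => b
  | some a, none => some a
  | some a, some b => some (min a b)

-- B's inner single-quote literal loop: returns (chunk appended, new i)
def pvSingleB (s : List Char) (n : Nat) : Nat → Nat → List Char × Nat
  | 0, j => (pvSlice s j n, n)
  | fuel + 1, j =>
    match pvFindCh s n (n - j) '\'' j with
    | none => (pvSlice s j n, n)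
    | some e =>
      if e + 1 < n ∧ s.getD (e + 1) ' ' = '\'' then
        (pvSlice s j (e + 2) ++ (pvSingleB s n fuel (e + 2)).1, (pvSingleB s n fuel (e + 2)).2)
      else (pvSlice s j (e + 1), e + 1)

-- B's main loop (ks/kd/kc = the three finds, k = min of those present, inlined)
def pvLoopB (s : List Char) (n : Nat) : Nat → Nat → List Char → List Char
  | 0, _, out => out
  | fuel + 1, i, out =>
    if i < n then
      match pvMin2 (pvMin2 (pvFindCh s n (n - i) '\'' i) (pvFindCh s n (n - i) '"' i)) (pvFindDash2 s n (n - i) i) with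
      | none => out ++ pvSlice s i n
      | some k =>
        if pvFindCh s n (n - i) '\'' i = some k then
          pvLoopB s n fuel (pvSingleB s n (n - (k + 1)) (k + 1)).2
            (out ++ pvSlice s i k ++ ['\''] ++ (pvSingleB s n (n - (k + 1)) (k + 1)).1)
        else if pvFindCh s n (n - i) '"' i = some k then
          match pvFindCh s n (n - (k + 1)) '"' (k + 1) with
          | none => out ++ pvSlice s i k ++ ['"'] ++ pvSlice s (k + 1) n
          | some e => pvLoopB s n fuel (e + 1) (out ++ pvSlice s i k ++ ['"'] ++ pvSlice s (k + 1) (e + 1))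
        else
          match pvFindCh s n (n - (k + 2)) '\n' (k + 2) with
          | none => out ++ pvSlice s i k
          | some e => pvLoopB s n fuel e (out ++ pvSlice s i k)
    else out

def strip_line_comments_py_alt (sql : String) : String :=
  String.ofList (pvLoopB sql.toList sql.toList.length sql.toList.length 0 [])

-- ===== PRECONDITION & SPEC =====
def Spec_strip_line_comments_py (sql : String) (out : String) : Prop := out = strip_line_comments_py_alt sql
instance (sql : String) (out : String) : Decidable (Spec_strip_line_comments_py sql out) := by unfold Spec_strip_line_comments_py; infer_instance

-- ===== CLAIM (what is proved, stated in full; the proofs are below) =====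
def Claim_equal_strip_line_comments_py : Prop := ∀ (sql : String), Dom_strip_line_comments_py sql → Spec_strip_line_comments_py sql (strip_line_comments_py sql)

-- ===== LEMMAS AND PROOFS =====

-- slice facts
lemma pvSlice_self (s : List Char) (i : Nat) : pvSlice s i i = [] := by simp [pvSlice]

lemma pvSlice_nil (s : List Char) {i k : Nat} (h : k ≤ i) : pvSlice s i k = [] := by
  unfold pvSlice; rw [show k - i = 0 by omega]; rfl

lemma pvSlice_cons (s : List Char) {i k : Nat} (h1 : i < k) (h2 : i < s.length) :
    pvSlice s i k = s.getD i ' ' :: pvSlice s (i + 1) k := by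
  unfold pvSlice
  rw [List.drop_eq_getElem_cons h2]
  rw [show k - i = (k - (i + 1)) + 1 by omega]
  rw [List.take_succ_cons]
  rw [List.getD_eq_getElem s ' ' h2]

lemma pvSlice_succ (s : List Char) {i j : Nat} (h1 : i ≤ j) (h2 : j < s.length) :
    pvSlice s i (j + 1) = pvSlice s i j ++ [s.getD j ' '] := by
  unfold pvSlice
  rw [show j + 1 - i = (j - i) + 1 by omega]
  rw [List.take_add_one]
  congr 1
  rw [List.getElem?_drop]
  rw [show i + (j - i) = j by omega]
  rw [List.getElem?_eq_getElem h2]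
  rw [List.getD_eq_getElem s ' ' h2]
  rfl

-- 3-way-minimum facts
lemma pvMin3_none {a b c : Option Nat} (h : pvMin2 (pvMin2 a b) c = none) :
    a = none ∧ b = none ∧ c = none := by
  cases a <;> cases b <;> cases c <;> simp [pvMin2] at h ⊢

lemma pvMin3_mem {a b c : Option Nat} {k : Nat} (h : pvMin2 (pvMin2 a b) c = some k) :
    a = some k ∨ b = some k ∨ c = some k := by
  cases a <;> cases b <;> cases c <;> simp [pvMin2] at h ⊢ <;> omega

lemma pvMin3_le {a b c : Option Nat} {k : Nat} (h : pvMin2 (pvMin2 a b) c = some k) :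
    (∀ x, a = some x → k ≤ x) ∧ (∀ x, b = some x → k ≤ x) ∧ (∀ x, c = some x → k ≤ x) := by
  cases a <;> cases b <;> cases c <;> simp [pvMin2] at h ⊢ <;> omega

-- find characterisations (fuel ≥ remaining range where needed)
lemma pvFindCh_ge {s : List Char} {n : Nat} {c : Char} :
    ∀ {f i e : Nat}, pvFindCh s n f c i = some e → i ≤ e ∧ e < n ∧ s.getD e ' ' = c := by
  intro f
  induction f with
  | zero => intro i e hf; exact absurd hf (by simp [pvFindCh])
  | succ f ih =>
    intro i e hf
    rw [pvFindCh] at hf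
    split at hf
    · split at hf
      · rename_i hi hc; cases hf; exact ⟨le_refl _, hi, hc⟩
      · have := ih hf; exact ⟨by omega, this.2⟩
    · exact absurd hf (by simp)

lemma pvFindCh_none {s : List Char} {n : Nat} {c : Char} :
    ∀ {f i : Nat}, n - i ≤ f → pvFindCh s n f c i = none →
      ∀ j, i ≤ j → j < n → s.getD j ' ' ≠ c := by
  intro f
  induction f with
  | zero => intro i hd hf j hij hjn; omega
  | succ f ih =>
    intro i hd hf j hij hjn
    rw [pvFindCh] at hf
    split at hf
    · split at hf
      · exact absurd hf (by simp)
      · rename_i hi hc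
        rcases Nat.eq_or_lt_of_le hij with rfl | hlt
        · exact hc
        · exact ih (by omega) hf j hlt hjn
    · omega

lemma pvFindCh_min {s : List Char} {n : Nat} {c : Char} :
    ∀ {f i e : Nat}, pvFindCh s n f c i = some e → ∀ j, i ≤ j → j < e → s.getD j ' ' ≠ c := by
  intro f
  induction f with
  | zero => intro i e hf; exact absurd hf (by simp [pvFindCh])
  | succ f ih =>
    intro i e hf j hij hje
    rw [pvFindCh] at hf
    split at hf
    · split at hf
      · rename_i hi hc; cases hf; omega
      · rename_i hi hc
        rcases Nat.eq_or_lt_of_le hij with rfl | hlt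
        · exact hc
        · exact ih hf j hlt hje
    · exact absurd hf (by simp)

lemma pvFindDash2_ge {s : List Char} {n : Nat} :
    ∀ {f i e : Nat}, pvFindDash2 s n f i = some e →
      i ≤ e ∧ e + 1 < n ∧ s.getD e ' ' = '-' ∧ s.getD (e + 1) ' ' = '-' := by
  intro f
  induction f with
  | zero => intro i e hf; exact absurd hf (by simp [pvFindDash2])
  | succ f ih =>
    intro i e hf
    rw [pvFindDash2] at hf
    split at hf
    · split at hf
      · rename_i hi hc; cases hf; exact ⟨le_refl _, hi, hc.1, hc.2⟩
      · have := ih hf; exact ⟨by omega, this.2⟩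
    · exact absurd hf (by simp)

lemma pvFindDash2_none {s : List Char} {n : Nat} :
    ∀ {f i : Nat}, n - i ≤ f → pvFindDash2 s n f i = none →
      ∀ j, i ≤ j → j + 1 < n → ¬(s.getD j ' ' = '-' ∧ s.getD (j + 1) ' ' = '-') := by
  intro f
  induction f with
  | zero => intro i hd hf j hij hjn; omega
  | succ f ih =>
    intro i hd hf j hij hjn
    rw [pvFindDash2] at hf
    split at hf
    · split at hf
      · exact absurd hf (by simp)
      · rename_i hi hc
        rcases Nat.eq_or_lt_of_le hij with rfl | hlt
        · exact hc
        · exact ih (by omega) hf j hlt hjn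
    · omega

lemma pvFindDash2_min {s : List Char} {n : Nat} :
    ∀ {f i e : Nat}, pvFindDash2 s n f i = some e →
      ∀ j, i ≤ j → j < e → j + 1 < n → ¬(s.getD j ' ' = '-' ∧ s.getD (j + 1) ' ' = '-') := by
  intro f
  induction f with
  | zero => intro i e hf; exact absurd hf (by simp [pvFindDash2])
  | succ f ih =>
    intro i e hf j hij hje hjn
    rw [pvFindDash2] at hf
    split at hf
    · split at hf
      · rename_i hi hc; cases hf; omega
      · rename_i hi hc
        rcases Nat.eq_or_lt_of_le hij with rfl | hlt
        · exact hc
        · exact ih hf j hlt hje hjn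
    · exact absurd hf (by simp)

-- fuel irrelevance: any fuel covering the remaining range gives the same find
lemma pvFindCh_irrel {s : List Char} {n : Nat} {c : Char} :
    ∀ {f g i : Nat}, n - i ≤ f → n - i ≤ g → pvFindCh s n f c i = pvFindCh s n g c i := by
  intro f
  induction f with
  | zero =>
    intro g i h1 h2
    cases g with
    | zero => rfl
    | succ g => rw [pvFindCh, pvFindCh, if_neg (by omega)]
  | succ f ih =>
    intro g i h1 h2
    cases g with
    | zero => rw [pvFindCh, pvFindCh, if_neg (by omega)]
    | succ g =>
      rw [pvFindCh]
      conv_rhs => rw [pvFindCh]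
      by_cases hi : i < n
      · rw [if_pos hi, if_pos hi]
        by_cases hc : s.getD i ' ' = c
        · rw [if_pos hc, if_pos hc]
        · rw [if_neg hc, if_neg hc]
          exact ih (by omega) (by omega)
      · rw [if_neg hi, if_neg hi]

lemma pvFindCh_step {s : List Char} {n : Nat} {c : Char} {f g i : Nat}
    (hf : n - i ≤ f) (hg : n - (i + 1) ≤ g) (h1 : i < n) (h2 : s.getD i ' ' ≠ c) :
    pvFindCh s n f c i = pvFindCh s n g c (i + 1) := by
  cases f with
  | zero => omega
  | succ f =>
    rw [pvFindCh, if_pos h1, if_neg h2]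
    exact pvFindCh_irrel (by omega) hg

-- at or past the end every loop is inert
lemma pvLoopA_end (s : List Char) (n : Nat) {i : Nat} (h : n ≤ i) :
    ∀ f ins ind out, pvLoopA s n f i ins ind out = out := by
  intro f ins ind out
  cases f with
  | zero => rfl
  | succ f => rw [pvLoopA, if_neg (by omega)]

lemma pvLoopB_end (s : List Char) (n : Nat) {i : Nat} (h : n ≤ i) :
    ∀ f out, pvLoopB s n f i out = out := by
  intro f out
  cases f with
  | zero => rfl
  | succ f => rw [pvLoopB, if_neg (by omega)]

-- A's loop result does not depend on the exact (sufficient) fuel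
lemma pvSkipA_ge (s : List Char) (n : Nat) : ∀ f i, i ≤ pvSkipA s n f i := by
  intro f
  induction f with
  | zero => intro i; exact le_refl i
  | succ f ih =>
    intro i
    rw [pvSkipA]
    split
    · have := ih (i + 1); omega
    · exact le_refl i

lemma pvLoopA_irrel (s : List Char) (n : Nat) :
    ∀ {f g i : Nat} {ins ind : Bool} {out : List Char}, n - i ≤ f → n - i ≤ g →
      pvLoopA s n f i ins ind out = pvLoopA s n g i ins ind out := by
  intro f
  induction f with
  | zero =>
    intro g i ins ind out h1 h2
    rw [pvLoopA_end s n (by omega), pvLoopA_end s n (by omega)]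
  | succ f ih =>
    intro g i ins ind out h1 h2
    by_cases hi : i < n
    · cases g with
      | zero => omega
      | succ g =>
        rw [pvLoopA]
        conv_rhs => rw [pvLoopA]
        rw [if_pos hi, if_pos hi]
        by_cases c1 : s.getD i ' ' = '\'' ∧ ind = false
        · rw [if_pos c1, if_pos c1]
          by_cases c1e : ins = true ∧ i + 1 < n ∧ s.getD (i + 1) ' ' = '\''
          · rw [if_pos c1e, if_pos c1e]; exact ih (by omega) (by omega)
          · rw [if_neg c1e, if_neg c1e]; exact ih (by omega) (by omega)
        · rw [if_neg c1, if_neg c1]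
          by_cases c2 : s.getD i ' ' = '"' ∧ ins = false
          · rw [if_pos c2, if_pos c2]; exact ih (by omega) (by omega)
          · rw [if_neg c2, if_neg c2]
            by_cases c3 : s.getD i ' ' = '-' ∧ i + 1 < n ∧ s.getD (i + 1) ' ' = '-' ∧ ins = false ∧ ind = false
            · rw [if_pos c3, if_pos c3]
              have hskip : i ≤ pvSkipA s n (n - i) i := pvSkipA_ge s n (n - i) i
              have hskip1 : i + 1 ≤ pvSkipA s n (n - i) i := by
                have hnz : n - i = (n - (i + 1)) + 1 := by omega
                rw [hnz, pvSkipA, if_pos ⟨hi, by rw [c3.1]; decide⟩]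
                exact pvSkipA_ge s n _ _
              exact ih (by omega) (by omega)
            · rw [if_neg c3, if_neg c3]; exact ih (by omega) (by omega)
    · rw [pvLoopA_end s n (by omega), pvLoopA_end s n (by omega)]

-- A's comment skip equals B's newline find
lemma pvSkipA_eq (s : List Char) (n : Nat) :
    ∀ {f g k : Nat}, k ≤ n → n - k ≤ f → n - k ≤ g → pvSkipA s n f k = (pvFindCh s n g '\n' k).getD n := by
  intro f
  induction f with
  | zero =>
    intro g k hkn h1 h2
    have hk : k = n := by omega
    cases g with
    | zero => simp [pvSkipA, pvFindCh]; omega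
    | succ g => rw [pvSkipA, pvFindCh, if_neg (by omega)]; simp; omega
  | succ f ih =>
    intro g k hkn h1 h2
    by_cases hk : k < n
    · cases g with
      | zero => omega
      | succ g =>
        by_cases hc : s.getD k ' ' = '\n'
        · rw [pvSkipA, pvFindCh]
          rw [if_neg (fun hh => hh.2 hc), if_pos hk, if_pos hc]
          simp
        · rw [pvSkipA, pvFindCh]
          rw [if_pos ⟨hk, hc⟩, if_pos hk, if_neg hc]
          exact ih (by omega) (by omega) (by omega)
    · cases g with
      | zero =>
        rw [pvSkipA, if_neg (fun hh => absurd hh.1 (by omega))]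
        simp [pvFindCh]; omega
      | succ g =>
        rw [pvSkipA, pvFindCh, if_neg (fun hh => absurd hh.1 (by omega)), if_neg (by omega)]
        simp; omega

-- B's literal consumer: the returned index is the close position (or n)
lemma pvSingleB_snd (s : List Char) (n : Nat) :
    ∀ f j, j ≤ (pvSingleB s n f j).2 ∨ (pvSingleB s n f j).2 = n := by
  intro f
  induction f with
  | zero => intro j; right; rfl
  | succ f ih =>
    intro j
    rw [pvSingleB]
    split
    · right; rfl
    · rename_i e hf
      have he := pvFindCh_ge hf
      split
      · rcases ih (e + 2) with h | h
        · left; simp only; omega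
        · right; simp only; omega
      · left; simp only; omega

-- unfold equations for pvSingleB / pvLoopB (one per branch)
lemma pvSingleB_we {s : List Char} {n j : Nat} (hf : pvFindCh s n (n - j) '\'' j = none) :
    ∀ f, pvSingleB s n f j = (pvSlice s j n, n) := by
  intro f
  cases f with
  | zero => rfl
  | succ f =>
    rw [pvSingleB]
    split
    · rfl
    · rename_i e hfe; rw [hf] at hfe; cases hfe

lemma pvSingleB_esc {s : List Char} {n j e f : Nat} (hf : pvFindCh s n (n - j) '\'' j = some e)
    (hc : e + 1 < n ∧ s.getD (e + 1) ' ' = '\'') :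
    pvSingleB s n (f + 1) j =
      (pvSlice s j (e + 2) ++ (pvSingleB s n f (e + 2)).1, (pvSingleB s n f (e + 2)).2) := by
  rw [pvSingleB]
  split
  · rename_i hfe; rw [hf] at hfe; cases hfe
  · rename_i e' hfe
    rw [hf] at hfe; cases hfe
    rw [if_pos hc]

lemma pvSingleB_close {s : List Char} {n j e f : Nat} (hf : pvFindCh s n (n - j) '\'' j = some e)
    (hc : ¬(e + 1 < n ∧ s.getD (e + 1) ' ' = '\'')) :
    pvSingleB s n (f + 1) j = (pvSlice s j (e + 1), e + 1) := by
  rw [pvSingleB]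
  split
  · rename_i hfe; rw [hf] at hfe; cases hfe
  · rename_i e' hfe
    rw [hf] at hfe; cases hfe
    rw [if_neg hc]

lemma pvLoopB_we {s : List Char} {n i f : Nat} {out : List Char} (hi : i < n)
    (hm : pvMin2 (pvMin2 (pvFindCh s n (n - i) '\'' i) (pvFindCh s n (n - i) '"' i)) (pvFindDash2 s n (n - i) i) = none) :
    pvLoopB s n (f + 1) i out = out ++ pvSlice s i n := by
  rw [pvLoopB, if_pos hi]
  split
  · rfl
  · rename_i k hmk; rw [hm] at hmk; cases hmk

lemma pvLoopB_single {s : List Char} {n i k f : Nat} {out : List Char} (hi : i < n)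
    (hm : pvMin2 (pvMin2 (pvFindCh s n (n - i) '\'' i) (pvFindCh s n (n - i) '"' i)) (pvFindDash2 s n (n - i) i) = some k)
    (hks : pvFindCh s n (n - i) '\'' i = some k) :
    pvLoopB s n (f + 1) i out =
      pvLoopB s n f (pvSingleB s n (n - (k + 1)) (k + 1)).2
        (out ++ pvSlice s i k ++ ['\''] ++ (pvSingleB s n (n - (k + 1)) (k + 1)).1) := by
  rw [pvLoopB, if_pos hi]
  split
  · rename_i hmk; rw [hm] at hmk; cases hmk
  · rename_i k' hmk
    rw [hm] at hmk; cases hmk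
    rw [if_pos hks]

lemma pvLoopB_double_none {s : List Char} {n i k f : Nat} {out : List Char} (hi : i < n)
    (hm : pvMin2 (pvMin2 (pvFindCh s n (n - i) '\'' i) (pvFindCh s n (n - i) '"' i)) (pvFindDash2 s n (n - i) i) = some k)
    (hks : ¬ pvFindCh s n (n - i) '\'' i = some k) (hkd : pvFindCh s n (n - i) '"' i = some k)
    (he : pvFindCh s n (n - (k + 1)) '"' (k + 1) = none) :
    pvLoopB s n (f + 1) i out = out ++ pvSlice s i k ++ ['"'] ++ pvSlice s (k + 1) n := by
  rw [pvLoopB, if_pos hi]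
  split
  · rename_i hmk; rw [hm] at hmk; cases hmk
  · rename_i k' hmk
    rw [hm] at hmk; cases hmk
    rw [if_neg hks, if_pos hkd]
    split
    · rfl
    · rename_i e hfe; rw [he] at hfe; cases hfe

lemma pvLoopB_double_some {s : List Char} {n i k e f : Nat} {out : List Char} (hi : i < n)
    (hm : pvMin2 (pvMin2 (pvFindCh s n (n - i) '\'' i) (pvFindCh s n (n - i) '"' i)) (pvFindDash2 s n (n - i) i) = some k)
    (hks : ¬ pvFindCh s n (n - i) '\'' i = some k) (hkd : pvFindCh s n (n - i) '"' i = some k)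
    (he : pvFindCh s n (n - (k + 1)) '"' (k + 1) = some e) :
    pvLoopB s n (f + 1) i out =
      pvLoopB s n f (e + 1) (out ++ pvSlice s i k ++ ['"'] ++ pvSlice s (k + 1) (e + 1)) := by
  rw [pvLoopB, if_pos hi]
  split
  · rename_i hmk; rw [hm] at hmk; cases hmk
  · rename_i k' hmk
    rw [hm] at hmk; cases hmk
    rw [if_neg hks, if_pos hkd]
    split
    · rename_i hfe; rw [he] at hfe; cases hfe
    · rename_i e' hfe; rw [he] at hfe; cases hfe; rfl

lemma pvLoopB_comment_none {s : List Char} {n i k f : Nat} {out : List Char} (hi : i < n)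
    (hm : pvMin2 (pvMin2 (pvFindCh s n (n - i) '\'' i) (pvFindCh s n (n - i) '"' i)) (pvFindDash2 s n (n - i) i) = some k)
    (hks : ¬ pvFindCh s n (n - i) '\'' i = some k) (hkd : ¬ pvFindCh s n (n - i) '"' i = some k)
    (he : pvFindCh s n (n - (k + 2)) '\n' (k + 2) = none) :
    pvLoopB s n (f + 1) i out = out ++ pvSlice s i k := by
  rw [pvLoopB, if_pos hi]
  split
  · rename_i hmk; rw [hm] at hmk; cases hmk
  · rename_i k' hmk
    rw [hm] at hmk; cases hmk
    rw [if_neg hks, if_neg hkd]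
    split
    · rfl
    · rename_i e hfe; rw [he] at hfe; cases hfe

lemma pvLoopB_comment_some {s : List Char} {n i k e f : Nat} {out : List Char} (hi : i < n)
    (hm : pvMin2 (pvMin2 (pvFindCh s n (n - i) '\'' i) (pvFindCh s n (n - i) '"' i)) (pvFindDash2 s n (n - i) i) = some k)
    (hks : ¬ pvFindCh s n (n - i) '\'' i = some k) (hkd : ¬ pvFindCh s n (n - i) '"' i = some k)
    (he : pvFindCh s n (n - (k + 2)) '\n' (k + 2) = some e) :
    pvLoopB s n (f + 1) i out = pvLoopB s n f e (out ++ pvSlice s i k) := by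
  rw [pvLoopB, if_pos hi]
  split
  · rename_i hmk; rw [hm] at hmk; cases hmk
  · rename_i k' hmk
    rw [hm] at hmk; cases hmk
    rw [if_neg hks, if_neg hkd]
    split
    · rename_i hfe; rw [he] at hfe; cases hfe
    · rename_i e' hfe; rw [he] at hfe; cases hfe; rfl

-- nothing before the minimum is a quote or a '--' start
lemma pv_nospecial {s : List Char} {n i k : Nat}
    (hm : pvMin2 (pvMin2 (pvFindCh s n (n - i) '\'' i) (pvFindCh s n (n - i) '"' i)) (pvFindDash2 s n (n - i) i) = some k) :
    ∀ j, i ≤ j → j < k →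
      s.getD j ' ' ≠ '\'' ∧ s.getD j ' ' ≠ '"' ∧
      ¬(s.getD j ' ' = '-' ∧ j + 1 < n ∧ s.getD (j + 1) ' ' = '-') := by
  intro j h1 h2
  have h3 := pvMin3_le hm
  have hkn : k ≤ n := by
    rcases pvMin3_mem hm with hx | hx | hx
    · have := pvFindCh_ge hx; omega
    · have := pvFindCh_ge hx; omega
    · have := pvFindDash2_ge hx; omega
  refine ⟨?_, ?_, ?_⟩
  · cases hks : pvFindCh s n (n - i) '\'' i with
    | none => exact pvFindCh_none (le_refl _) hks j h1 (by omega)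
    | some e =>
      have := h3.1 e hks
      exact pvFindCh_min hks j h1 (by omega)
  · cases hkd : pvFindCh s n (n - i) '"' i with
    | none => exact pvFindCh_none (le_refl _) hkd j h1 (by omega)
    | some e =>
      have := h3.2.1 e hkd
      exact pvFindCh_min hkd j h1 (by omega)
  · rintro ⟨hc1, hc2, hc3⟩
    cases hkc : pvFindDash2 s n (n - i) i with
    | none => exact pvFindDash2_none (le_refl _) hkc j h1 hc2 ⟨hc1, hc3⟩
    | some e =>
      have := h3.2.2 e hkc
      exact pvFindDash2_min hkc j h1 (by omega) hc2 ⟨hc1, hc3⟩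

-- A copies plain code char-by-char: over a special-free stretch it appends exactly the slice
lemma pv_gap_code (s : List Char) :
    ∀ d i k fa g out, k - i ≤ d → i ≤ k → k ≤ s.length →
      (∀ j, i ≤ j → j < k →
        s.getD j ' ' ≠ '\'' ∧ s.getD j ' ' ≠ '"' ∧
        ¬(s.getD j ' ' = '-' ∧ j + 1 < s.length ∧ s.getD (j + 1) ' ' = '-')) →
      s.length - i ≤ fa → s.length - k ≤ g →
      pvLoopA s s.length fa i false false out = pvLoopA s s.length g k false false (out ++ pvSlice s i k) := by
  intro d
  induction d with
  | zero =>
    intro i k fa g out hd h1 h2 hns hfa hg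
    have hik : i = k := by omega
    subst hik
    rw [pvSlice_self, List.append_nil]
    exact pvLoopA_irrel s s.length hfa hg
  | succ d ih =>
    intro i k fa g out hd h1 h2 hns hfa hg
    rcases Nat.eq_or_lt_of_le h1 with rfl | hik
    · rw [pvSlice_self, List.append_nil]
      exact pvLoopA_irrel s s.length hfa hg
    · have hin : i < s.length := by omega
      obtain ⟨fa', rfl⟩ : ∃ fa', fa = fa' + 1 := ⟨fa - 1, by omega⟩
      have hj := hns i (le_refl _) hik
      rw [pvLoopA, if_pos hin]
      rw [if_neg (fun hh => hj.1 hh.1)]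
      rw [if_neg (fun hh => hj.2.1 hh.1)]
      rw [if_neg (fun hh => hj.2.2 ⟨hh.1, hh.2.1, hh.2.2.1⟩)]
      rw [ih (i + 1) k fa' g (out ++ [s.getD i ' ']) (by omega) hik h2
        (fun j ha hb => hns j (by omega) hb) (by omega) hg]
      rw [pvSlice_cons s hik hin]
      simp

-- inside a single-quoted literal every char up to the closing quote is copied verbatim
lemma pv_gap_single (s : List Char) :
    ∀ d j e fa g out, e - j ≤ d → j ≤ e → e ≤ s.length →
      (∀ m, j ≤ m → m < e → s.getD m ' ' ≠ '\'') →
      s.length - j ≤ fa → s.length - e ≤ g →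
      pvLoopA s s.length fa j true false out = pvLoopA s s.length g e true false (out ++ pvSlice s j e) := by
  intro d
  induction d with
  | zero =>
    intro j e fa g out hd h1 h2 hns hfa hg
    have hje : j = e := by omega
    subst hje
    rw [pvSlice_self, List.append_nil]
    exact pvLoopA_irrel s s.length hfa hg
  | succ d ih =>
    intro j e fa g out hd h1 h2 hns hfa hg
    rcases Nat.eq_or_lt_of_le h1 with rfl | hje
    · rw [pvSlice_self, List.append_nil]
      exact pvLoopA_irrel s s.length hfa hg
    · have hjn : j < s.length := by omega
      obtain ⟨fa', rfl⟩ : ∃ fa', fa = fa' + 1 := ⟨fa - 1, by omega⟩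
      have hj := hns j (le_refl _) hje
      rw [pvLoopA, if_pos hjn]
      rw [if_neg (fun hh => hj hh.1)]
      rw [if_neg (fun hh => by simp at hh)]
      rw [if_neg (fun hh => by simp at hh)]
      rw [ih (j + 1) e fa' g (out ++ [s.getD j ' ']) (by omega) hje h2
        (fun m ha hb => hns m (by omega) hb) (by omega) hg]
      rw [pvSlice_cons s hje hjn]
      simp

-- inside a double-quoted literal likewise
lemma pv_gap_double (s : List Char) :
    ∀ d j e fa g out, e - j ≤ d → j ≤ e → e ≤ s.length →
      (∀ m, j ≤ m → m < e → s.getD m ' ' ≠ '"') →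
      s.length - j ≤ fa → s.length - e ≤ g →
      pvLoopA s s.length fa j false true out = pvLoopA s s.length g e false true (out ++ pvSlice s j e) := by
  intro d
  induction d with
  | zero =>
    intro j e fa g out hd h1 h2 hns hfa hg
    have hje : j = e := by omega
    subst hje
    rw [pvSlice_self, List.append_nil]
    exact pvLoopA_irrel s s.length hfa hg
  | succ d ih =>
    intro j e fa g out hd h1 h2 hns hfa hg
    rcases Nat.eq_or_lt_of_le h1 with rfl | hje
    · rw [pvSlice_self, List.append_nil]
      exact pvLoopA_irrel s s.length hfa hg
    · have hjn : j < s.length := by omega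
      obtain ⟨fa', rfl⟩ : ∃ fa', fa = fa' + 1 := ⟨fa - 1, by omega⟩
      have hj := hns j (le_refl _) hje
      rw [pvLoopA, if_pos hjn]
      rw [if_neg (fun hh => by simp at hh)]
      rw [if_neg (fun hh => hj hh.1)]
      rw [if_neg (fun hh => by simp at hh)]
      rw [ih (j + 1) e fa' g (out ++ [s.getD j ' ']) (by omega) hje h2
        (fun m ha hb => hns m (by omega) hb) (by omega) hg]
      rw [pvSlice_cons s hje hjn]
      simp

-- A's single-quote mode from j agrees with B's literal consumer pvSingleB
lemma pv_single (s : List Char) :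
    ∀ d j fa fb g out, s.length - j ≤ d → j ≤ s.length →
      s.length - j ≤ fa → s.length - j ≤ fb →
      s.length - (pvSingleB s s.length fb j).2 ≤ g →
      pvLoopA s s.length fa j true false out =
        pvLoopA s s.length g (pvSingleB s s.length fb j).2 false false (out ++ (pvSingleB s s.length fb j).1) := by
  intro d
  induction d with
  | zero =>
    intro j fa fb g out hd hj hfa hfb hg
    have hje : j = s.length := by omega
    subst hje
    have hf : pvFindCh s s.length (s.length - s.length) '\'' s.length = none := by
      rw [show s.length - s.length = 0 by omega]; rfl
    rw [pvSingleB_we hf]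
    simp only
    rw [pvSlice_nil s (le_refl _), List.append_nil]
    rw [pvLoopA_end s s.length (le_refl _), pvLoopA_end s s.length (le_refl _)]
  | succ d ih =>
    intro j fa fb g out hd hj hfa hfb hg
    cases hf : pvFindCh s s.length (s.length - j) '\'' j with
    | none =>
      rw [pvSingleB_we hf]
      simp only
      rw [pv_gap_single s (s.length - j) j s.length fa 1 out (le_refl _) hj (le_refl _)
        (fun m h1 h2 => pvFindCh_none (le_refl _) hf m h1 h2) hfa (by omega)]
      rw [pvLoopA_end s s.length (le_refl _), pvLoopA_end s s.length (le_refl _)]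
    | some e =>
      have he := pvFindCh_ge hf
      obtain ⟨fb', rfl⟩ : ∃ fb', fb = fb' + 1 := ⟨fb - 1, by omega⟩
      rw [pv_gap_single s (e - j) j e fa (s.length - e) out (le_refl _) he.1 (by omega)
        (fun m h1 h2 => pvFindCh_min hf m h1 h2) hfa (le_refl _)]
      obtain ⟨fe, hfe⟩ : ∃ fe, s.length - e = fe + 1 := ⟨s.length - e - 1, by omega⟩
      rw [hfe, pvLoopA, if_pos (show e < s.length by omega)]
      rw [if_pos ⟨he.2.2, rfl⟩]
      by_cases hesc : e + 1 < s.length ∧ s.getD (e + 1) ' ' = '\''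
      · rw [if_pos ⟨rfl, hesc.1, hesc.2⟩]
        rw [pvSingleB_esc hf hesc] at hg ⊢
        dsimp only at hg ⊢
        rw [ih (e + 2) fe fb' g (out ++ pvSlice s j e ++ ['\'', '\'']) (by omega) (by omega)
          (by omega) (by omega) hg]
        rw [pvSlice_succ s (show j ≤ e + 1 by omega) (by omega)]
        rw [pvSlice_succ s he.1 (by omega)]
        rw [he.2.2, hesc.2]
        simp
      · rw [if_neg (fun hh => hesc ⟨hh.2.1, hh.2.2⟩)]
        simp only [Bool.not_true]
        rw [pvSingleB_close hf hesc] at hg ⊢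
        dsimp only at hg ⊢
        rw [pvSlice_succ s he.1 (by omega), he.2.2]
        rw [pvLoopA_irrel s s.length (show s.length - (e + 1) ≤ fe by omega) hg]
        simp

-- main correspondence: A's state machine in code mode equals B's tokenizer
lemma pv_main_aux (s : List Char) :
    ∀ d i fa fb out, s.length - i ≤ d → s.length - i ≤ fa → s.length - i ≤ fb →
      pvLoopA s s.length fa i false false out = pvLoopB s s.length fb i out := by
  intro d
  induction d with
  | zero =>
    intro i fa fb out hd hfa hfb
    rw [pvLoopA_end s s.length (by omega), pvLoopB_end s s.length (by omega)]
  | succ d ih =>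
    intro i fa fb out hd hfa hfb
    by_cases hi : i < s.length
    · obtain ⟨fb', rfl⟩ : ∃ fb', fb = fb' + 1 := ⟨fb - 1, by omega⟩
      cases hm : pvMin2 (pvMin2 (pvFindCh s s.length (s.length - i) '\'' i)
          (pvFindCh s s.length (s.length - i) '"' i)) (pvFindDash2 s s.length (s.length - i) i) with
      | none =>
        rw [pvLoopB_we hi hm]
        have h3 := pvMin3_none hm
        rw [pv_gap_code s (s.length - i) i s.length fa 1 out (le_refl _) (by omega) (le_refl _)
          (fun j h1 h2 => ⟨pvFindCh_none (le_refl _) h3.1 j h1 h2,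
            pvFindCh_none (le_refl _) h3.2.1 j h1 h2,
            fun hc => pvFindDash2_none (le_refl _) h3.2.2 j h1 hc.2.1 ⟨hc.1, hc.2.2⟩⟩) hfa (by omega)]
        rw [pvLoopA_end s s.length (le_refl _)]
      | some k =>
        have hns := pv_nospecial hm
        have hik : i ≤ k := by
          rcases pvMin3_mem hm with hx | hx | hx
          · exact (pvFindCh_ge hx).1
          · exact (pvFindCh_ge hx).1
          · exact (pvFindDash2_ge hx).1
        have hkn : k < s.length := by
          rcases pvMin3_mem hm with hx | hx | hx
          · exact (pvFindCh_ge hx).2.1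
          · exact (pvFindCh_ge hx).2.1
          · have := pvFindDash2_ge hx; omega
        rw [pv_gap_code s (k - i) i k fa (s.length - k) out (le_refl _) hik (by omega)
          (fun j h1 h2 => hns j h1 h2) hfa (le_refl _)]
        obtain ⟨fk, hfk⟩ : ∃ fk, s.length - k = fk + 1 := ⟨s.length - k - 1, by omega⟩
        by_cases hks : pvFindCh s s.length (s.length - i) '\'' i = some k
        · have hch : s.getD k ' ' = '\'' := (pvFindCh_ge hks).2.2
          rw [hfk, pvLoopA, if_pos hkn, if_pos ⟨hch, rfl⟩, if_neg (by simp)]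
          simp only [Bool.not_false]
          rw [hch]
          rw [pv_single s (s.length - (k + 1)) (k + 1) fk (s.length - (k + 1)) fb'
            (out ++ pvSlice s i k ++ ['\'']) (le_refl _) (by omega) (by omega) (le_refl _)
            (by have := pvSingleB_snd s s.length (s.length - (k + 1)) (k + 1); omega)]
          rw [ih (pvSingleB s s.length (s.length - (k + 1)) (k + 1)).2 fb' fb' _
            (by have := pvSingleB_snd s s.length (s.length - (k + 1)) (k + 1); omega)
            (by have := pvSingleB_snd s s.length (s.length - (k + 1)) (k + 1); omega)
            (by have := pvSingleB_snd s s.length (s.length - (k + 1)) (k + 1); omega)]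
          rw [pvLoopB_single hi hm hks]
        · by_cases hkd : pvFindCh s s.length (s.length - i) '"' i = some k
          · have hch : s.getD k ' ' = '"' := (pvFindCh_ge hkd).2.2
            rw [hfk, pvLoopA, if_pos hkn]
            rw [if_neg (fun hh => by rw [hch] at hh; exact absurd hh.1 (by decide))]
            rw [if_pos ⟨hch, rfl⟩]
            simp only [Bool.not_false]
            rw [hch]
            cases he : pvFindCh s s.length (s.length - (k + 1)) '"' (k + 1) with
            | none =>
              rw [pv_gap_double s (s.length - (k + 1)) (k + 1) s.length fk 1 _ (le_refl _)
                (by omega) (le_refl _) (fun m h1 h2 => pvFindCh_none (le_refl _) he m h1 h2)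
                (by omega) (by omega)]
              rw [pvLoopA_end s s.length (le_refl _)]
              rw [pvLoopB_double_none hi hm hks hkd he]
            | some e =>
              have hee := pvFindCh_ge he
              rw [pv_gap_double s (e - (k + 1)) (k + 1) e fk (s.length - e) _ (le_refl _) hee.1
                (by omega) (fun m h1 h2 => pvFindCh_min he m h1 h2) (by omega) (le_refl _)]
              obtain ⟨fe, hfe2⟩ : ∃ fe, s.length - e = fe + 1 := ⟨s.length - e - 1, by omega⟩
              rw [hfe2, pvLoopA, if_pos (show e < s.length by omega)]
              rw [if_neg (fun hh => by rw [hee.2.2] at hh; exact absurd hh.1 (by decide))]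
              rw [if_pos ⟨hee.2.2, rfl⟩]
              simp only [Bool.not_true]
              rw [ih (e + 1) fe fb' _ (by omega) (by omega) (by omega)]
              rw [pvLoopB_double_some hi hm hks hkd he]
              rw [pvSlice_succ s hee.1 (by omega), hee.2.2]
              simp
          · have hkc : pvFindDash2 s s.length (s.length - i) i = some k := by
              rcases pvMin3_mem hm with hx | hx | hx
              · exact absurd hx hks
              · exact absurd hx hkd
              · exact hx
            have hkk := pvFindDash2_ge hkc
            rw [hfk, pvLoopA, if_pos hkn]
            rw [if_neg (fun hh => by rw [hkk.2.2.1] at hh; exact absurd hh.1 (by decide))]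
            rw [if_neg (fun hh => by rw [hkk.2.2.1] at hh; exact absurd hh.1 (by decide))]
            rw [if_pos ⟨hkk.2.2.1, hkk.2.1, hkk.2.2.2, rfl, rfl⟩]
            rw [pvSkipA_eq s s.length (show k ≤ s.length by omega) (le_refl _) (le_refl _)]
            rw [pvFindCh_step (le_refl _) (le_refl _) (show k < s.length by omega)
              (by rw [hkk.2.2.1]; decide)]
            rw [pvFindCh_step (le_refl _) (le_refl _) (show k + 1 < s.length from hkk.2.1)
              (by rw [hkk.2.2.2]; decide)]
            cases he : pvFindCh s s.length (s.length - (k + 2)) '\n' (k + 2) with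
            | none =>
              simp only [Option.getD_none]
              rw [pvLoopA_end s s.length (le_refl _)]
              rw [pvLoopB_comment_none hi hm hks hkd he]
            | some e =>
              simp only [Option.getD_some]
              have hee := pvFindCh_ge he
              rw [ih e fk fb' _ (by omega) (by omega) (by omega)]
              rw [pvLoopB_comment_some hi hm hks hkd he]
    · rw [pvLoopA_end s s.length (by omega), pvLoopB_end s s.length (by omega)]

lemma pv_main (s : List Char) :
    pvLoopA s s.length s.length 0 false false [] = pvLoopB s s.length s.length 0 [] :=
  pv_main_aux s s.length 0 s.length s.length [] (by omega) (by omega) (by omega)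

-- ===== VERDICT (by name: the statement is the Claim_ definition above) =====
theorem strip_line_comments_py_spec : Claim_equal_strip_line_comments_py := by
  intro sql _
  show strip_line_comments_py sql = strip_line_comments_py_alt sql
  unfold strip_line_comments_py strip_line_comments_py_alt
  rw [pv_main]
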